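-- pv_equiv track=rewrite | github.com/Albertowska/codeJam2020-Qualification | Indicium/codeJam.py | enum
-- ===== SOURCE A (Python) =====
-- import itertools
-- import operator
--
-- def valid(cols_so_far):
--     for i, col1 in enumerate(cols_so_far):
--         for col2 in cols_so_far[i + 1:]:
--             if any(map(operator.eq, col1, col2)):
--                 return False
--     return True
--
-- def enum(values, k, cols_so_far=None):
--     if cols_so_far is None:
--         cols_so_far = (tuple(values),)
--     if not valid(cols_so_far):
--         pass
--     elif len(cols_so_far) == k:
--         yield tuple(zip(*cols_so_far))  # transpose
--     else:
--         for perm in itertools.permutations(values):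
--             yield from enum(values, k, cols_so_far + (perm,))
-- ===== SOURCE B (Python) =====
-- import itertools
-- import operator
--
--
-- def _fits(q, col):
--     # q may sit next to col iff they differ at every shared position
--     return not any(map(operator.eq, q, col))
--
--
-- def enum(values, k, cols_so_far=None):
--     cols = (tuple(values),) if cols_so_far is None else tuple(tuple(c) for c in cols_so_far)
--     # validate the given columns once, pair by pair
--     if any(not _fits(c1, c2) for c1, c2 in itertools.combinations(cols, 2)):
--         return
--     if len(cols) == k:
--         yield tuple(zip(*cols))  # transpose
--         return
--     if len(cols) > k:
--         return  # columns only ever accumulate, so width k is unreachable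
--     # breadth-first frontier of valid prefixes; each candidate column is checked
--     # only against the columns of its own prefix (incremental validity)
--     perms = list(itertools.permutations(values))
--     frontier = [cols]
--     for _ in range(k - len(cols)):
--         if not frontier:
--             break
--         frontier = [p + (q,)
--                     for p in frontier
--                     for q in perms
--                     if all(_fits(q, c) for c in p)]
--     for p in frontier:
--         yield tuple(zip(*p))
-- ===== Notes on version B (the rewrite author's own statement) =====
-- stated objective: faster
-- what changed: B replaces A's depth-first recursion, which re-validates every pair of columns of the whole prefix at every search node (including nodes whose prefix is already invalid), by a breadth-first frontier of valid prefixes in which the given columns are validated once and each candidate column is checked only against the columns of its own prefix before it is added.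
import Mathlib
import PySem

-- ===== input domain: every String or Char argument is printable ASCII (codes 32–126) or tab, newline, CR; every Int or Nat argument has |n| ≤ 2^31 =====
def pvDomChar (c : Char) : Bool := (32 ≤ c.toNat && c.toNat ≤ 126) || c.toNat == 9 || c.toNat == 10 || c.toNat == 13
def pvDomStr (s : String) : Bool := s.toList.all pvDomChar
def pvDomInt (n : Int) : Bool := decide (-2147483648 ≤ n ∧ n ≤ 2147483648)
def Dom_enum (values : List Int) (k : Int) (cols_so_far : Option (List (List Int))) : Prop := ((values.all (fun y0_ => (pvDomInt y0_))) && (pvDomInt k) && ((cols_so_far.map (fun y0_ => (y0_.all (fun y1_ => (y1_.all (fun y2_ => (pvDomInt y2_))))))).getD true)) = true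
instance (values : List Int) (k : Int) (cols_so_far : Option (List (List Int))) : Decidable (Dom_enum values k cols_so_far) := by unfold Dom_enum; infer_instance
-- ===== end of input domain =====

-- B replaces A's depth-first recursion (which re-validates ALL column pairs of the prefix at
-- every node) by a breadth-first frontier of valid prefixes in which each candidate column is
-- checked only against the columns of its own prefix; leaves sit at uniform depth, so the order
-- of the yielded grids is unchanged. Both Pythons are generators; the lists below are the
-- sequences of yielded values.

-- any(map(operator.eq, col1, col2)) — zip truncates at the shorter column
def pvClash (c1 c2 : List Int) : Bool := (c1.zip c2).any (fun ab => ab.1 == ab.2)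

-- tuple(zip(*cols)): Python zip of the columns (rows up to the shortest column; zip() = empty).
-- Structural fuel = length of the first column: zip stops at the shortest column, so the first
-- column's length always suffices; this is exact for Python's zip.
def pvZipGo : Nat → List (List Int) → List (List Int)
  | 0, _ => []
  | n + 1, cols =>
    if cols.all (fun c => !c.isEmpty) then
      (cols.map (fun c => c.headD 0)) :: pvZipGo n (cols.map (fun c => c.tail))
    else []

def pvZip (cols : List (List Int)) : List (List Int) :=
  match cols with
  | [] => []
  | c :: _ => pvZipGo c.length cols

-- ===== PORT A =====
-- valid(cols_so_far): the nested loop over enumerate(cols_so_far) and cols_so_far[i+1:]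
def pvValid : List (List Int) → Bool
  | [] => true
  | c :: rest => (rest.all (fun c2 => !pvClash c c2)) && pvValid rest

-- the recursion of A, with fuel (Python's recursion is unbounded; on Pre_ inputs the fuel suffices:
-- the search deepens at most (k - len).toNat steps towards len = k, plus, with nonempty values, at
-- most |values| pairwise-discordant appended columns and one pruned level)
def pvGoA (values : List Int) (k : Int) : Nat → List (List Int) → List (List (List Int))
  | 0, _ => []
  | fuel + 1, cols =>
    if !pvValid cols then []
    else if (cols.length : Int) == k then [pvZip cols]
    else (PySem.List.permutations values values.length).flatMap
      (fun perm => pvGoA values k fuel (cols ++ [perm]))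

def enum (values : List Int) (k : Int) (cols_so_far : Option (List (List Int))) : List (List (List Int)) :=
  let cols := match cols_so_far with | none => [values] | some cs => cs
  pvGoA values k ((k - cols.length).toNat + values.length + 2) cols

-- ===== PORT B =====
-- _fits(q, col): not any(map(operator.eq, q, col))
def pvFits (q c : List Int) : Bool := !((q.zip c).any (fun ab => ab.1 == ab.2))

-- itertools.combinations(cols, 2)
def pvPairs : List (List Int) → List (List Int × List Int)
  | [] => []
  | c :: rest => rest.map (fun c2 => (c, c2)) ++ pvPairs rest

-- one frontier expansion: [p + (q,) for p in frontier for q in perms if all(_fits(q, c) for c in p)]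
def pvStep (perms : List (List Int)) (frontier : List (List (List Int))) : List (List (List Int)) :=
  frontier.flatMap (fun p => perms.flatMap (fun q => if p.all (fun c => pvFits q c) then [p ++ [q]] else []))

-- the 'for _ in range(k - len(cols)):' loop with its 'if not frontier: break'
def pvBFS (perms : List (List Int)) : Nat → List (List (List Int)) → List (List (List Int))
  | 0, frontier => frontier
  | d + 1, frontier => if frontier.isEmpty then frontier else pvBFS perms d (pvStep perms frontier)

def enum_alt (values : List Int) (k : Int) (cols_so_far : Option (List (List Int))) : List (List (List Int)) :=
  let cols := match cols_so_far with | none => [values] | some cs => cs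
  if (pvPairs cols).any (fun pr => !pvFits pr.1 pr.2) then []
  else if (cols.length : Int) == k then [pvZip cols]
  else if k < (cols.length : Int) then []
  else (pvBFS (PySem.List.permutations values values.length) (k - cols.length).toNat [cols]).map pvZip

-- ===== PRECONDITION & SPEC =====
def Spec_enum (values : List Int) (k : Int) (cols_so_far : Option (List (List Int))) (out : List (List (List Int))) : Prop := out = enum_alt values k cols_so_far
instance (values : List Int) (k : Int) (cols_so_far : Option (List (List Int))) (out : List (List (List Int))) : Decidable (Spec_enum values k cols_so_far out) := by unfold Spec_enum; infer_instance

-- ===== CLAIM (what is proved, stated in full; the proofs are below) =====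
def Claim_equal_enum : Prop := ∀ (values : List Int) (k : Int) (cols_so_far : Option (List (List Int))), Dom_enum values k cols_so_far → Spec_enum values k cols_so_far (enum values k cols_so_far)

-- ===== LEMMAS AND PROOFS =====

theorem pvFits_eq (q c : List Int) : pvFits q c = !pvClash q c := rfl

theorem pvClash_comm (a b : List Int) : pvClash a b = pvClash b a := by
  induction a generalizing b with
  | nil => cases b <;> simp [pvClash]
  | cons x xs ih =>
    cases b with
    | nil => simp [pvClash]
    | cons y ys =>
      simp only [pvClash, List.zip_cons_cons, List.any_cons] at *
      rw [ih ys]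
      rcases eq_or_ne x y with h | h
      · subst h; rfl
      · rw [beq_false_of_ne h, beq_false_of_ne (Ne.symm h)]

theorem pvGoA_invalid (values : List Int) (k : Int) (fuel : Nat) (cols : List (List Int))
    (h : pvValid cols = false) : pvGoA values k fuel cols = [] := by
  cases fuel with
  | zero => rfl
  | succ f => simp [pvGoA, h]

theorem pvValid_append (cols : List (List Int)) (p : List Int) :
    pvValid (cols ++ [p]) = (pvValid cols && cols.all (fun c => !pvClash c p)) := by
  induction cols with
  | nil => simp [pvValid]
  | cons c rest ih =>
    simp only [List.cons_append, pvValid, List.all_append, List.all_cons, List.all_nil, ih,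
      List.all_cons]
    cases pvClash c p <;> cases pvValid rest <;> cases rest.all (fun c2 => !pvClash c c2) <;>
      cases rest.all (fun c2 => !pvClash c2 p) <;> simp

theorem pvPairs_clash (cols : List (List Int)) :
    (pvPairs cols).any (fun pr => !pvFits pr.1 pr.2) = !pvValid cols := by
  induction cols with
  | nil => simp [pvPairs, pvValid]
  | cons c rest ih =>
    have ih' : ((pvPairs rest).any fun pr => pvClash pr.1 pr.2) = !pvValid rest := by
      simpa [pvFits_eq] using ih
    simp only [pvPairs, pvValid, List.any_append, List.any_map, Function.comp_def, pvFits_eq,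
      Bool.not_not, Bool.not_and, ih']
    rw [show (rest.any fun c2 => pvClash c c2) = !(rest.all fun c2 => !pvClash c c2) by
      simp [List.any_eq_not_all_not]]

theorem pvGoA_gt (values : List Int) (k : Int) (fuel : Nat) (cols : List (List Int))
    (h : k < (cols.length : Int)) : pvGoA values k fuel cols = [] := by
  induction fuel generalizing cols with
  | zero => rfl
  | succ f ih =>
    simp only [pvGoA]
    cases hv : pvValid cols with
    | false => simp
    | true =>
      have hne : ((cols.length : Int) == k) = false := by
        simp only [beq_eq_false_iff_ne, ne_eq]; omega
      simp only [hne, Bool.not_true, Bool.false_eq_true, if_false]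
      rw [List.flatMap_eq_nil_iff.mpr]
      intro x hx
      exact ih (cols ++ [x]) (by simp; omega)

theorem pvBFS_nil (perms : List (List Int)) (d : Nat) : pvBFS perms d [] = [] := by
  cases d <;> simp [pvBFS]

theorem pvBFS_succ (perms : List (List Int)) (d : Nat) (fr : List (List (List Int))) :
    pvBFS perms (d + 1) fr = pvBFS perms d (pvStep perms fr) := by
  cases fr with
  | nil => simp [pvBFS, pvStep, pvBFS_nil]
  | cons a l => simp [pvBFS]

theorem pvStep_append (perms : List (List Int)) (a b : List (List (List Int))) :
    pvStep perms (a ++ b) = pvStep perms a ++ pvStep perms b := by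
  simp [pvStep]

theorem pvBFS_append (perms : List (List Int)) (d : Nat) (a b : List (List (List Int))) :
    pvBFS perms d (a ++ b) = pvBFS perms d a ++ pvBFS perms d b := by
  induction d generalizing a b with
  | zero => simp [pvBFS]
  | succ n ih => rw [pvBFS_succ, pvBFS_succ, pvBFS_succ, pvStep_append, ih]

theorem pvBFS_flatMap (perms : List (List Int)) (d : Nat) {α : Type}
    (l : List α) (g : α → List (List (List Int))) :
    pvBFS perms d (l.flatMap g) = l.flatMap (fun x => pvBFS perms d (g x)) := by
  induction l with
  | nil => simp [pvBFS_nil]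
  | cons x xs ih => simp only [List.flatMap_cons, pvBFS_append, ih]

theorem pvGoA_eq_bfs (values : List Int) (k : Int) (d fuel : Nat) (cols : List (List Int))
    (hv : pvValid cols = true) (hl : (cols.length : Int) + d = k) (hf : d + 1 ≤ fuel) :
    pvGoA values k fuel cols
      = (pvBFS (PySem.List.permutations values values.length) d [cols]).map pvZip := by
  induction d generalizing fuel cols with
  | zero =>
    obtain ⟨f, rfl⟩ : ∃ f, fuel = f + 1 := ⟨fuel - 1, by omega⟩
    have : ((cols.length : Int) == k) = true := by simpa using (by omega : (cols.length : Int) = k)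
    simp [pvGoA, pvBFS, hv, this]
  | succ n ih =>
    obtain ⟨f, rfl⟩ : ∃ f, fuel = f + 1 := ⟨fuel - 1, by omega⟩
    have hne : ((cols.length : Int) == k) = false := by
      simp only [beq_eq_false_iff_ne, ne_eq]; omega
    simp only [pvGoA, hv, Bool.not_true, Bool.false_eq_true, if_false, hne]
    rw [pvBFS_succ]
    have hstep : pvStep (PySem.List.permutations values values.length) [cols]
        = (PySem.List.permutations values values.length).flatMap
            (fun q => if cols.all (fun c => pvFits q c) then [cols ++ [q]] else []) := by
      simp [pvStep]
    rw [hstep, pvBFS_flatMap, List.map_flatMap]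
    refine List.flatMap_congr ?_  -- pointwise over the permutations
    intro q _
    cases hq : cols.all (fun c => pvFits q c) with
    | true =>
      have hvalid : pvValid (cols ++ [q]) = true := by
        rw [pvValid_append, hv, Bool.true_and,
          congrArg cols.all (funext fun c => by rw [pvFits_eq, pvClash_comm] :
            (fun c => !pvClash c q) = fun c => pvFits q c)]
        exact hq
      simp only [if_true]
      exact ih f (cols ++ [q]) hvalid (by simp; omega) (by omega)
    | false =>
      have hinvalid : pvValid (cols ++ [q]) = false := by
        rw [pvValid_append, hv, Bool.true_and,
          congrArg cols.all (funext fun c => by rw [pvFits_eq, pvClash_comm] :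
            (fun c => !pvClash c q) = fun c => pvFits q c)]
        exact hq
      simp only [Bool.false_eq_true, if_false, pvBFS_nil, List.map_nil]
      exact pvGoA_invalid values k f _ hinvalid

theorem enum_eq_alt (values : List Int) (k : Int) (cols : List (List Int)) :
    pvGoA values k ((k - cols.length).toNat + values.length + 2) cols
      = (if (pvPairs cols).any (fun pr => !pvFits pr.1 pr.2) then []
         else if (cols.length : Int) == k then [pvZip cols]
         else if k < (cols.length : Int) then []
         else (pvBFS (PySem.List.permutations values values.length)
                 (k - cols.length).toNat [cols]).map pvZip) := by
  rw [pvPairs_clash]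
  cases hv : pvValid cols with
  | false => simp [pvGoA_invalid values k _ cols hv]
  | true =>
    simp only [Bool.not_true, Bool.false_eq_true, if_false]
    rcases lt_trichotomy ((cols.length : Int)) k with h | h | h
    · have hne : ((cols.length : Int) == k) = false := by
        simp only [beq_eq_false_iff_ne, ne_eq]; omega
      have hnlt : ¬ k < (cols.length : Int) := by omega
      rw [hne, if_neg hnlt]
      simp only [Bool.false_eq_true, if_false]
      exact pvGoA_eq_bfs values k (k - cols.length).toNat _ cols hv (by omega) (by omega)
    · have heq : ((cols.length : Int) == k) = true := by simpa using h
      rw [heq]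
      simp only [if_true]
      exact pvGoA_eq_bfs values k 0 _ cols hv (by omega) (by omega) |>.trans (by simp [pvBFS])
    · have hne : ((cols.length : Int) == k) = false := by
        simp only [beq_eq_false_iff_ne, ne_eq]; omega
      rw [hne, if_pos h]
      simp only [Bool.false_eq_true, if_false]
      exact pvGoA_gt values k _ cols h

-- ===== VERDICT (by name: the statement is the Claim_ definition above) =====
theorem enum_spec : Claim_equal_enum := by
  intro values k cols_so_far _
  unfold Spec_enum enum enum_alt
  cases cols_so_far with
  | none => exact enum_eq_alt values k [values]
  | some cs => exact enum_eq_alt values k cs
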